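-- pv_equiv track=rewrite | github.com/Nitin1627/password-breach-checker- | app/checker.py | _find_breach_count
-- ===== SOURCE A (Python) =====
-- def _find_breach_count(response_text: str, target_suffix: str) -> int:
--     """
--     Parse API response to find breach count for specific hash suffix.
--
--     The API returns lines in format:
--     HASH_SUFFIX:COUNT
--
--     Args:
--         response_text: Raw API response text
--         target_suffix: The hash suffix to search for
--
--     Returns:
--         Breach count (0 if not found)
--     """
--     target_suffix_upper = target_suffix.upper()
--
--     for line in response_text.strip().split('\n'):
--         line = line.strip()
--         if not line:
--             continue
--
--         # Line format: HASH_SUFFIX:COUNT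
--         if ':' in line:
--             parts = line.split(':')
--             if len(parts) >= 2:
--                 suffix = parts[0].strip().upper()
--                 try:
--                     count = int(parts[1].strip())
--                     if suffix == target_suffix_upper:
--                         return count
--                 except ValueError:
--                     # Skip malformed lines
--                     continue
--
--     return 0
-- ===== SOURCE B (Python) =====
-- def _find_breach_count(response_text: str, target_suffix: str) -> int:
--     """Index the response once into a dict (first valid count per suffix), then look up."""
--     table = {}
--     for raw in response_text.strip().split('\n'):
--         line = raw.strip()
--         if ':' in line:
--             parts = line.split(':')
--             try:
--                 table.setdefault(parts[0].strip().upper(), int(parts[1].strip()))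
--             except ValueError:
--                 pass
--     return table.get(target_suffix.upper(), 0)
-- ===== Notes on version B (the rewrite author's own statement) =====
-- stated objective: alternative
-- what changed: A's early-return linear scan is replaced by a single pass that indexes every well-formed line into a dict keyed by upper-cased suffix (setdefault keeps the first valid count), followed by one dict lookup of the target suffix.
import Mathlib
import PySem

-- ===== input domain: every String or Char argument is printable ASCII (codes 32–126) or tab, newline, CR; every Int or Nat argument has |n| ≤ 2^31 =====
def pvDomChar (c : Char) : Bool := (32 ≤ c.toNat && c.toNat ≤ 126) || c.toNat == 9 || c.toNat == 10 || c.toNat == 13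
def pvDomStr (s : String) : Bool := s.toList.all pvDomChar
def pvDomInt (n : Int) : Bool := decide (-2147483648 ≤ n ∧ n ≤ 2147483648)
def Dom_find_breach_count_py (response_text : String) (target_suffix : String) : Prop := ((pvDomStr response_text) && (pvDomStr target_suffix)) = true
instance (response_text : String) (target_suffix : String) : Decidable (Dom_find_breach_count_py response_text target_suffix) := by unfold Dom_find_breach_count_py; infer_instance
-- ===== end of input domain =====

-- B replaces A's early-return scan by one pass that indexes every valid line into a dict
-- (first valid count per suffix, via setdefault) followed by a single lookup; same result, alternative shape.

-- ===== PORT A =====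
-- A's loop over the stripped, '\n'-split lines: the first line whose suffix matches and whose
-- count parses returns that count; otherwise 0 at the end.
def pvA_loop : List String → String → Int
  | [], _ => 0
  | l :: rest, tupper =>
    let line := PySem.Str.strip l
    if line = "" then pvA_loop rest tupper
    else if PySem.Str.isIn ":" line then
      match (PySem.Str.split? line ":").getD [] with  -- sep ":" nonempty: split? is always some
      | p0 :: p1 :: _ =>          -- len(parts) >= 2
        match PySem.Int.ofStr? (PySem.Str.strip p1) with   -- int(...); none = ValueError
        | some count =>
          if PySem.Str.upper (PySem.Str.strip p0) = tupper then count else pvA_loop rest tupper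
        | none => pvA_loop rest tupper
      | _ => pvA_loop rest tupper
    else pvA_loop rest tupper

def find_breach_count_py (response_text : String) (target_suffix : String) : Int :=
  pvA_loop (((PySem.Str.split? (PySem.Str.strip response_text) "\n").getD []))
    (PySem.Str.upper target_suffix)

-- ===== PORT B =====
-- B's per-line step: if the stripped line contains ':', parse the count; on success setdefault
-- (first occurrence wins).  ':' in line guarantees >= 2 parts, so the fallback arm is unreachable.
def pvB_step (d : PySem.Dict String Int) (raw : String) : PySem.Dict String Int :=
  if PySem.Str.isIn ":" (PySem.Str.strip raw) then
    match (PySem.Str.split? (PySem.Str.strip raw) ":").getD [] with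
    | p0 :: p1 :: _ =>
      match PySem.Int.ofStr? (PySem.Str.strip p1) with
      | some count => d.setdefault (PySem.Str.upper (PySem.Str.strip p0)) count
      | none => d
    | _ => d
  else d

def find_breach_count_py_alt (response_text : String) (target_suffix : String) : Int :=
  let table := (((PySem.Str.split? (PySem.Str.strip response_text) "\n").getD [])).foldl pvB_step PySem.Dict.empty
  table.getD (PySem.Str.upper target_suffix) 0

-- ===== PRECONDITION & SPEC =====
def Spec_find_breach_count_py (response_text : String) (target_suffix : String) (out : Int) : Prop := out = find_breach_count_py_alt response_text target_suffix
instance (response_text : String) (target_suffix : String) (out : Int) : Decidable (Spec_find_breach_count_py response_text target_suffix out) := by unfold Spec_find_breach_count_py; infer_instance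

-- ===== CLAIM (what is proved, stated in full; the proofs are below) =====
def Claim_equal_find_breach_count_py : Prop := ∀ (response_text : String) (target_suffix : String), Dom_find_breach_count_py response_text target_suffix → Spec_find_breach_count_py response_text target_suffix (find_breach_count_py response_text target_suffix)

-- ===== LEMMAS AND PROOFS =====

-- Invariant of B's fold: looking up t in the dict after folding the remaining lines over any
-- seed dict d gives d's binding of t if present, else the value A's scan of those lines returns.
theorem pvB_fold_getD (lines : List String) (d : PySem.Dict String Int) (t : String) :
    (lines.foldl pvB_step d).getD t 0 = (d.get? t).getD (pvA_loop lines t) := by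
  induction lines generalizing d with
  | nil =>
    simp only [List.foldl_nil, pvA_loop, PySem.Dict.getD]
  | cons l rest ih =>
    rw [List.foldl_cons, ih]
    simp only [pvA_loop, pvB_step]
    by_cases h0 : PySem.Str.strip l = ""
    · rw [h0]
      rw [if_pos rfl, if_neg (by decide : ¬ (PySem.Str.isIn ":" "" = true))]
    · rw [if_neg h0]
      by_cases h1 : PySem.Str.isIn ":" (PySem.Str.strip l) = true
      · rw [if_pos h1, if_pos h1]
        rcases hsp : (PySem.Str.split? (PySem.Str.strip l) ":").getD [] with _ | ⟨p0, _ | ⟨p1, ps⟩⟩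
        · rfl
        · rfl
        · dsimp only
          rcases hc : PySem.Int.ofStr? (PySem.Str.strip p1) with _ | count
          · rfl
          · dsimp only
            by_cases hs : PySem.Str.upper (PySem.Str.strip p0) = t
            · rw [hs, if_pos rfl, PySem.Dict.get?_setdefault_self, Option.getD_some]
            · have hne : t ≠ PySem.Str.upper (PySem.Str.strip p0) := fun h => hs h.symm
              rw [if_neg hs, PySem.Dict.get?_setdefault_of_ne _ _ hne]
      · rw [if_neg h1, if_neg h1]

-- ===== VERDICT (by name: the statement is the Claim_ definition above) =====
theorem find_breach_count_py_spec : Claim_equal_find_breach_count_py := by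
  intro r t _
  show find_breach_count_py r t = find_breach_count_py_alt r t
  unfold find_breach_count_py find_breach_count_py_alt
  dsimp only
  rw [pvB_fold_getD, PySem.Dict.get?_empty, Option.getD_none]
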